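-- pv_equiv track=rewrite | github.com/alantao5056/USACO_Bronze | 2020_january_bronze/race/race.py | getTime
-- ===== SOURCE A (Python) =====
-- def couldAdd(distanceRan, finishSpeed, speed, distance):
--   if speed == 0:
--     return True
--   speed += 1
--   distanceRan += speed
--   while distanceRan < distance:
--     distanceRan += (speed - 1)
--     speed -= 1
--     if speed == 0:
--       return True
--   if speed > finishSpeed:
--     return False
--   return True
--
-- def couldKeepGoing(distanceRan, finishSpeed, speed, distance):
--   if distanceRan + speed >= distance and speed <= finishSpeed:
--     return True
--   distanceRan += speed
--   return couldAdd(distanceRan, finishSpeed, speed, distance)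
--
-- def getTime(distance, finishSpeed):
--   distanceRan = 0
--   curSpeed = 0
--   count = 0
--
--   while distanceRan < distance:
--     if couldAdd(distanceRan, finishSpeed, curSpeed, distance):
--       curSpeed += 1
--       distanceRan += curSpeed
--     elif couldKeepGoing(distanceRan, finishSpeed, curSpeed, distance):
--       distanceRan += curSpeed
--     else:
--       curSpeed -= 1
--       distanceRan += curSpeed
--     count += 1
--   return count
-- ===== SOURCE B (Python) =====
-- # Same greedy second-by-second simulation, but the inner "decelerate and see
-- # where we cross" rehearsal loops of A are replaced by closed-form
-- # triangular-number arithmetic with an integer square root: O(1) per second.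
--
-- def _isqrt(n):
--   # Newton's method (the same iteration as math.isqrt / Lean's Nat.sqrt)
--   if n <= 1:
--     return n
--   g = n // 2
--   while True:
--     nxt = (g + n // g) // 2
--     if nxt < g:
--       g = nxt
--     else:
--       return g
--
-- def _decelOutcome(dr, f, s, d):
--   # True iff, decelerating one unit per second from speed s at position dr,
--   # we either come to a stop before reaching d, or cross d at speed <= f.
--   if dr >= d:
--     return s <= f
--   rem = dr + s * (s - 1) // 2 - d
--   if rem < 0:
--     return True  # stalls before the finish line
--   v = (1 + _isqrt(8 * rem + 1)) // 2  # speed at the moment of crossing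
--   return v <= f
--
-- def _canSpeedUp(dr, f, s, d):
--   if s == 0:
--     return True
--   return _decelOutcome(dr + s + 1, f, s + 1, d)
--
-- def _canHold(dr, f, s, d):
--   if dr + s >= d and s <= f:
--     return True
--   return _canSpeedUp(dr + s, f, s, d)
--
-- def getTime(distance, finishSpeed):
--   dr = 0
--   s = 0
--   t = 0
--   while dr < distance:
--     if _canSpeedUp(dr, finishSpeed, s, distance):
--       s += 1
--     elif not _canHold(dr, finishSpeed, s, distance):
--       s -= 1
--     dr += s
--     t += 1
--   return t
-- ===== Notes on version B (the rewrite author's own statement) =====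
-- stated objective: faster
-- what changed: The inner rehearsal loops (couldAdd/couldKeepGoing decelerate second by second to see where the runner would cross the line) are replaced by closed-form triangular-number arithmetic: the remainder dr + s*(s-1)//2 - d plus one integer square root yields the crossing speed in O(1) per simulated second.
import Mathlib
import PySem

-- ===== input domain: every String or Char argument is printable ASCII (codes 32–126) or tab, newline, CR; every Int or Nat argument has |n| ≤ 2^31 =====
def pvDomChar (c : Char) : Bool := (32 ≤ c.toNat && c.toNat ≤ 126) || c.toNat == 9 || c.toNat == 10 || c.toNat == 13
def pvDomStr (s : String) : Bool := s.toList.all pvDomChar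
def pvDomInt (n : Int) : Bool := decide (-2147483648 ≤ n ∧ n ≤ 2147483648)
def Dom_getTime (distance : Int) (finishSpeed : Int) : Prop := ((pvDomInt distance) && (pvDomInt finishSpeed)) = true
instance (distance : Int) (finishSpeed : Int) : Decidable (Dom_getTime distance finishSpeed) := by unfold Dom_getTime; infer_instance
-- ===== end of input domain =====

-- B replaces A's inner deceleration-rehearsal loops by closed-form triangular-number
-- arithmetic with an integer square root (O(1) per simulated second); same greedy outer loop.

-- ===== PORT A =====
-- the 'while distanceRan < distance' loop inside couldAdd; fuel only makes it total
-- (for speed ≥ 1 it runs at most speed iterations; Python diverges where fuel would run out)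
def decelLoopA (distance finishSpeed : Int) (distanceRan speed : Int) (fuel : Nat) : Bool :=
  match fuel with
  | 0 => false
  | fuel + 1 =>
    if distanceRan < distance then
      let dr := distanceRan + (speed - 1)
      let s := speed - 1
      if s = 0 then true else decelLoopA distance finishSpeed dr s fuel
    else decide (speed ≤ finishSpeed)

def couldAdd (distanceRan finishSpeed speed distance : Int) : Bool :=
  if speed = 0 then true
  else
    let s := speed + 1
    let dr := distanceRan + s
    decelLoopA distance finishSpeed dr s (s.toNat + 1)

def couldKeepGoing (distanceRan finishSpeed speed distance : Int) : Bool :=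
  if distanceRan + speed ≥ distance ∧ speed ≤ finishSpeed then true
  else couldAdd (distanceRan + speed) finishSpeed speed distance

-- the main 'while distanceRan < distance' loop; fuel only makes it total
-- (the loop advances at least one unit of distance every two iterations)
def loopA (distance finishSpeed : Int) (distanceRan curSpeed count : Int) (fuel : Nat) : Int :=
  match fuel with
  | 0 => count
  | fuel + 1 =>
    if distanceRan < distance then
      if couldAdd distanceRan finishSpeed curSpeed distance then
        loopA distance finishSpeed (distanceRan + (curSpeed + 1)) (curSpeed + 1) (count + 1) fuel
      else if couldKeepGoing distanceRan finishSpeed curSpeed distance then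
        loopA distance finishSpeed (distanceRan + curSpeed) curSpeed (count + 1) fuel
      else
        loopA distance finishSpeed (distanceRan + (curSpeed - 1)) (curSpeed - 1) (count + 1) fuel
    else count

def getTime (distance : Int) (finishSpeed : Int) : Int :=
  loopA distance finishSpeed 0 0 0 ((2 * distance).toNat + 4)

-- ===== PORT B =====
-- Source B's _isqrt is Newton's iteration 'nxt = (g + n // g) // 2', the very algorithm of Lean
-- core's Nat.sqrt (Nat.sqrt.iter), including the 'n <= 1' base case; exact for every n.
def isqrtB (n : Int) : Int := if n ≤ 1 then n else Int.ofNat (Nat.sqrt n.toNat)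

def decelOutcome (dr f s d : Int) : Bool :=
  if dr ≥ d then decide (s ≤ f)
  else if dr + PySem.Int.floordiv (s * (s - 1)) 2 - d < 0 then true  -- rem < 0: stalls before the finish
  else decide (PySem.Int.floordiv
    (1 + isqrtB (8 * (dr + PySem.Int.floordiv (s * (s - 1)) 2 - d) + 1)) 2 ≤ f)

def canSpeedUp (dr f s d : Int) : Bool :=
  if s = 0 then true else decelOutcome (dr + s + 1) f (s + 1) d

def canHold (dr f s d : Int) : Bool :=
  if dr + s ≥ d ∧ s ≤ f then true else canSpeedUp (dr + s) f s d

def loopB (d f : Int) (dr s t : Int) (fuel : Nat) : Int :=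
  match fuel with
  | 0 => t
  | fuel + 1 =>
    if dr < d then
      let s' := if canSpeedUp dr f s d then s + 1 else if canHold dr f s d then s else s - 1
      loopB d f (dr + s') s' (t + 1) fuel
    else t

def getTime_alt (distance : Int) (finishSpeed : Int) : Int :=
  loopB distance finishSpeed 0 0 0 ((2 * distance).toNat + 4)

-- ===== PRECONDITION & SPEC =====
def Spec_getTime (distance : Int) (finishSpeed : Int) (out : Int) : Prop := out = getTime_alt distance finishSpeed
instance (distance : Int) (finishSpeed : Int) (out : Int) : Decidable (Spec_getTime distance finishSpeed out) := by unfold Spec_getTime; infer_instance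

-- ===== CLAIM (what is proved, stated in full; the proofs are below) =====
def Claim_equal_getTime : Prop := ∀ (distance : Int) (finishSpeed : Int), Dom_getTime distance finishSpeed → Spec_getTime distance finishSpeed (getTime distance finishSpeed)

-- ===== LEMMAS AND PROOFS =====

-- isqrtB agrees with Nat.sqrt on nonnegative input
lemma isqrtB_nonneg (m : Int) (hm : 0 ≤ m) : isqrtB m = (Nat.sqrt m.toNat : Int) := by
  unfold isqrtB
  split_ifs with h
  · have : m = 0 ∨ m = 1 := by omega
    rcases this with rfl | rfl <;> simp
  · rfl

-- the triangular number s*(s-1)//2 is exact: twice it gives back the product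
lemma two_tri (s : Int) : 2 * PySem.Int.floordiv (s * (s - 1)) 2 = s * (s - 1) := by
  rw [PySem.Int.floordiv_eq_ediv_of_pos (by omega)]
  have hdvd : 2 ∣ s * (s - 1) := by
    have h := Int.even_mul_succ_self (s - 1)
    have h2 : Even (s * (s - 1)) := by
      have he : (s - 1) * (s - 1 + 1) = s * (s - 1) := by ring
      rwa [he] at h
    exact h2.two_dvd
  rw [mul_comm]
  exact Int.ediv_mul_cancel hdvd

lemma tri_nonneg (s : Int) (hs : 1 ≤ s) : 0 ≤ PySem.Int.floordiv (s * (s - 1)) 2 := by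
  have := two_tri s
  nlinarith

-- peeling one deceleration second off the triangular number
lemma tri_step (s : Int) :
    PySem.Int.floordiv (s * (s - 1)) 2
      = (s - 1) + PySem.Int.floordiv ((s - 1) * (s - 1 - 1)) 2 := by
  have h1 := two_tri s
  have h2 := two_tri (s - 1)
  nlinarith [h1, h2]

-- the crossing speed read off the triangular remainder
lemma vmax_eq (rem s : Int) (h1 : 1 ≤ s) (h2 : s * (s - 1) ≤ 2 * rem)
    (h3 : 2 * rem < s * (s + 1)) :
    PySem.Int.floordiv (1 + isqrtB (8 * rem + 1)) 2 = s := by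
  have hrem : 0 ≤ rem := by nlinarith
  rw [isqrtB_nonneg _ (by omega)]
  set n : Nat := (8 * rem + 1).toNat with hn
  have hncast : (n : Int) = 8 * rem + 1 := by omega
  set a : Nat := s.toNat with ha
  have hacast : (a : Int) = s := by omega
  have h2a : 1 ≤ 2 * a := by omega
  have hlb : (2 * a - 1) * (2 * a - 1) ≤ n := by
    zify [h2a]
    rw [hacast, hncast]
    nlinarith
  have hub : n < (2 * a + 1) * (2 * a + 1) := by
    zify
    rw [hacast, hncast]
    nlinarith
  have hs1 : 2 * a - 1 ≤ Nat.sqrt n := Nat.le_sqrt.mpr hlb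
  have hs2 : Nat.sqrt n < 2 * a + 1 := Nat.sqrt_lt.mpr hub
  refine (PySem.Int.floordiv_eq_iff_of_pos (by omega)).mpr ⟨by omega, by omega⟩

-- one deceleration second preserves the closed-form outcome
lemma decelOutcome_step (d f dr s : Int) (hd : dr < d) (hs : 2 ≤ s) :
    decelOutcome (dr + (s - 1)) f (s - 1) d = decelOutcome dr f s d := by
  have hrem : dr + PySem.Int.floordiv (s * (s - 1)) 2 - d
      = dr + (s - 1) + PySem.Int.floordiv ((s - 1) * (s - 1 - 1)) 2 - d := by
    rw [tri_step]; ring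
  have htri := two_tri (s - 1)
  have htn := tri_nonneg (s - 1) (by omega)
  unfold decelOutcome
  conv_rhs => rw [if_neg (show ¬ dr ≥ d by omega)]
  by_cases hX : dr + (s - 1) ≥ d
  · conv_lhs => rw [if_pos hX]
    have h0 : ¬ (dr + PySem.Int.floordiv (s * (s - 1)) 2 - d < 0) := by omega
    rw [if_neg h0]
    have hv : PySem.Int.floordiv
        (1 + isqrtB (8 * (dr + PySem.Int.floordiv (s * (s - 1)) 2 - d) + 1)) 2 = s - 1 := by
      apply vmax_eq _ _ (by omega)
      · rw [hrem]; nlinarith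
      · rw [hrem]; nlinarith
    rw [hv]
  · conv_lhs => rw [if_neg hX]
    rw [hrem]

-- the simulated deceleration loop of A equals B's closed form
lemma decel_eq (d f : Int) : ∀ (fuel : Nat) (dr s : Int), 1 ≤ s → s.toNat ≤ fuel →
    decelLoopA d f dr s fuel = decelOutcome dr f s d := by
  intro fuel
  induction fuel with
  | zero => intro dr s hs hf; omega
  | succ fuel ih =>
    intro dr s hs hf
    unfold decelLoopA
    by_cases hlt : dr < d
    · rw [if_pos hlt]
      by_cases hs1 : s - 1 = 0
      · rw [if_pos hs1]
        have hz : PySem.Int.floordiv ((1 : Int) * (1 - 1)) 2 = 0 := by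
          rw [PySem.Int.floordiv_eq_ediv_of_pos (by omega)]; norm_num
        have hsone : s = 1 := by omega
        subst hsone
        unfold decelOutcome
        rw [if_neg (show ¬ dr ≥ d by omega)]
        rw [hz]
        rw [if_pos (by omega)]
      · rw [if_neg hs1]
        rw [ih _ _ (by omega) (by omega)]
        exact decelOutcome_step d f dr s hlt (by omega)
    · rw [if_neg hlt]
      unfold decelOutcome
      rw [if_pos (by omega)]

lemma couldAdd_eq (dr f s d : Int) (hs : 0 ≤ s) :
    couldAdd dr f s d = canSpeedUp dr f s d := by
  unfold couldAdd canSpeedUp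
  by_cases h0 : s = 0
  · rw [if_pos h0, if_pos h0]
  · rw [if_neg h0, if_neg h0]
    rw [decel_eq d f _ _ _ (by omega) (by omega)]
    rw [← add_assoc]

lemma couldKeepGoing_eq (dr f s d : Int) (hs : 0 ≤ s) :
    couldKeepGoing dr f s d = canHold dr f s d := by
  unfold couldKeepGoing canHold
  by_cases h : dr + s ≥ d ∧ s ≤ f
  · rw [if_pos h, if_pos h]
  · rw [if_neg h, if_neg h]
    exact couldAdd_eq (dr + s) f s d hs

-- if B cannot accelerate, the current speed is nonzero
lemma canSpeedUp_ne_zero (dr f s d : Int) (h : canSpeedUp dr f s d = false) : s ≠ 0 := by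
  intro h0
  rw [canSpeedUp, if_pos h0] at h
  simp at h

-- the two outer simulation loops agree step by step (curSpeed stays nonnegative)
lemma loop_eq (d f : Int) : ∀ (fuel : Nat) (dr s t : Int), 0 ≤ s →
    loopA d f dr s t fuel = loopB d f dr s t fuel := by
  intro fuel
  induction fuel with
  | zero => intro dr s t _; rfl
  | succ fuel ih =>
    intro dr s t hs
    unfold loopA loopB
    by_cases hlt : dr < d
    · rw [couldAdd_eq dr f s d hs, couldKeepGoing_eq dr f s d hs]
      by_cases hA : canSpeedUp dr f s d = true
      · simp only [if_pos hlt, hA, if_true]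
        exact ih _ _ _ (by omega)
      · have hA' : canSpeedUp dr f s d = false := by
          revert hA; cases canSpeedUp dr f s d <;> simp
        have hsne : s ≠ 0 := canSpeedUp_ne_zero dr f s d hA'
        by_cases hK : canHold dr f s d = true
        · simp only [if_pos hlt, hA', hK, Bool.false_eq_true, if_false, if_true]
          exact ih _ _ _ hs
        · have hK' : canHold dr f s d = false := by
            revert hK; cases canHold dr f s d <;> simp
          simp only [if_pos hlt, hA', hK', Bool.false_eq_true, if_false]
          exact ih _ _ _ (by omega)
    · rw [if_neg hlt, if_neg hlt]

-- ===== VERDICT (by name: the statement is the Claim_ definition above) =====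
theorem getTime_spec : Claim_equal_getTime := by
  intro distance finishSpeed _
  unfold Spec_getTime getTime getTime_alt
  exact loop_eq distance finishSpeed _ 0 0 0 le_rfl
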